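-- pv_equiv track=rewrite | github.com/IGVF-DACC/igvf-catalog | data/adapters/dbSNFP_adapter.py | breakdown_line
-- ===== SOURCE A (Python) =====
-- def breakdown_line(original_data_line):
--     data_lines = []
--
--     # original_data_line:  "1     69091    A    C    M    L    .    1    6901    1    58954    22;1    OR4F5;OR4FA    ..."
--     data_line = []
--     for column in original_data_line:
--         data_line.append(column.strip().split(';'))
--
--     # data_line example: [['1'], ['69091'], ['A'], ['C'], ['M'], ['L'], ['.'], ['1'], ... ,
--     # ['69091'], ['1'], ['58954'], ['22', '1'], ['OR4F5', 'OR4FA'], ['ENSG00000186092', 'ENSG00000186090'], ...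
--
--     # data_lines output:
--     # record 1: [['1'], ['69091'], ['A'], ['C'], ['M'], ['L'], ['.'], ['1'], ... ,
--     # ['69091'], ['1'], ['58954'], ['22'], ['OR4F5'], ['ENSG00000186092'], ...
--
--     # record 2: [['1'], ['69091'], ['A'], ['C'], ['M'], ['L'], ['.'], ['1'], ... ,
--     # ['69091'], ['1'], ['58954'], ['1'], ['OR4FA'], ['ENSG00000186090'], ...
--
--     # Assuming position is essential to define a coding variant
--     # We are determining how many records are defined per row based on how many positions are listed
--     # in the current example, max_idx = len(['22', '1']) = 2
--     # assuming all related arrays will be of length 2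
--     max_idx = len(data_line[11])
--
--     idx = 0
--     while idx < max_idx:
--         individual_data_line = []
--         for column in data_line:
--             # there are cases where we have missing values in a few scores
--             # example: aapos: ['22', '1'] => max_idx = 2 and score: ['1']
--             # assuming the missing value is the last one and filling up with None
--             if len(column) > 1 and idx >= len(column):
--                 individual_data_line.append(None)
--             else:
--                 individual_data_line.append(
--                     column[idx] if len(column) > 1 else column[0])
--         data_lines.append(individual_data_line)
--         idx += 1
--
--     return data_lines
-- ===== SOURCE B (Python) =====
-- def breakdown_line(original_data_line):
--     # Column-wise normalization + transpose instead of per-record index selection.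
--     cols = [column.strip().split(';') for column in original_data_line]
--     max_idx = len(cols[11])
--     norm = []
--     for col in cols:
--         if len(col) > 1:
--             # truncate to max_idx, right-pad with None
--             norm.append((col[:max_idx] + [None] * max_idx)[:max_idx])
--         else:
--             # broadcast the single value
--             norm.append([col[0]] * max_idx)
--     return [list(rec) for rec in zip(*norm)]
-- ===== Notes on version B (the rewrite author's own statement) =====
-- stated objective: idiomatic
-- what changed: B normalizes each split column once into a fixed-length list (broadcast singletons, truncate-and-None-pad multi-value columns) and produces the records by transposing with zip(*cols), instead of A's per-record while loop that re-inspects every column's length at every index.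
import Mathlib
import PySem

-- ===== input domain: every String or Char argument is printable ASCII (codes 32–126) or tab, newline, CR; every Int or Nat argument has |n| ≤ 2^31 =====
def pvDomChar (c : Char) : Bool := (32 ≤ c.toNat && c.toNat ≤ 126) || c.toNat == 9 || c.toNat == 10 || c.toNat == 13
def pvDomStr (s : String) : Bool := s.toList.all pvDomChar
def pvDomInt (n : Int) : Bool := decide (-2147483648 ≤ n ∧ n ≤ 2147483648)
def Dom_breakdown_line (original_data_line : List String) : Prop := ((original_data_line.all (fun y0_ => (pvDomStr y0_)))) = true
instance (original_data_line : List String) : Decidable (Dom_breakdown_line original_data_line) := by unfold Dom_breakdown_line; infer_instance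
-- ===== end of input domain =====

-- B normalizes every split column to a fixed-length padded list and builds the records by
-- transposing (zip) instead of index-selecting inside a per-record loop (same cost, different decomposition).


-- shared helper: column.strip().split(';'); the separator ";" is nonempty so split? is always `some`
def pvSplitSemi (column : String) : List String :=
  (PySem.Str.split? (PySem.Str.strip column) ";").getD []

-- ===== PORT A =====
def breakdown_line (original_data_line : List String) : List (List (Option String)) :=
  let data_line := original_data_line.map pvSplitSemi
  -- data_line[11]; `none` = IndexError, excluded by Pre_
  match PySem.List.pyGet? data_line 11 with
  | none => []
  | some c11 =>
    let max_idx := c11.length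
    -- while idx < max_idx: build individual_data_line column by column, append, idx += 1
    (List.range max_idx).foldl (fun data_lines idx =>
      data_lines ++ [data_line.map (fun column =>
        if 1 < column.length ∧ column.length ≤ idx then (none : Option String)
        -- column[idx] / column[0]; in-range in every reachable branch, so getD is exact
        else some (if 1 < column.length then column.getD idx "" else column.getD 0 ""))]) []

-- ===== PORT B =====
def breakdown_line_alt (original_data_line : List String) : List (List (Option String)) :=
  let cols := original_data_line.map pvSplitSemi
  match PySem.List.pyGet? cols 11 with
  | none => []
  | some c11 =>
    let max_idx := c11.length
    -- normalize each column to exactly max_idx entries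
    let norm := cols.map (fun col =>
      if 1 < col.length then
        -- (col[:max_idx] + [None] * max_idx)[:max_idx]
        ((col.map some).take max_idx ++ List.replicate max_idx (none : Option String)).take max_idx
      else
        -- [col[0]] * max_idx  (col[0] in range in Python: split never yields []); getD is exact there
        List.replicate max_idx (some (col.getD 0 "")))
    -- [list(rec) for rec in zip(*norm)]: zip truncates at the shortest column
    let k := ((norm.map List.length).min?).getD 0
    (List.range k).map (fun i => norm.map (fun col => col.getD i none))

-- ===== PRECONDITION & SPEC =====
-- Pre_ excludes exactly the inputs with fewer than 12 columns, where A raises IndexError on data_line[11]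
def Pre_breakdown_line (original_data_line : List String) : Prop :=
  12 ≤ original_data_line.length
instance (original_data_line : List String) : Decidable (Pre_breakdown_line original_data_line) := by
  unfold Pre_breakdown_line; infer_instance

def pvWitness_breakdown_line : List String :=
  ["1", "69091", "A", "C", "M", "L", ".", "1", "69091", "1", "58954", "22;1"]

def Spec_breakdown_line (original_data_line : List String) (out : List (List (Option String))) : Prop := out = breakdown_line_alt original_data_line
instance (original_data_line : List String) (out : List (List (Option String))) : Decidable (Spec_breakdown_line original_data_line out) := by unfold Spec_breakdown_line; infer_instance

-- ===== CLAIM (what is proved, stated in full; the proofs are below) =====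
def Claim_equal_breakdown_line : Prop := ∀ (original_data_line : List String), Dom_breakdown_line original_data_line → Pre_breakdown_line original_data_line → Spec_breakdown_line original_data_line (breakdown_line original_data_line)

-- ===== LEMMAS AND PROOFS =====

-- appending one record per loop turn is mapping over the range
theorem pv_foldl_app {α β : Type} (f : α → β) : ∀ (l : List α) (acc : List β),
    l.foldl (fun a i => a ++ [f i]) acc = acc ++ l.map f := by
  intro l
  induction l with
  | nil => simp
  | cons x xs ih => intro acc; simp [List.foldl_cons, ih]

theorem pv_min?_replicate (m : Nat) : ∀ n : Nat, 0 < n →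
    (List.replicate n m).min? = some m := by
  intro n
  induction n with
  | zero => intro h; omega
  | succ k ih =>
    intro _
    rcases Nat.eq_zero_or_pos k with hk | hk
    · subst hk; simp [List.replicate]
    · have := ih hk
      rw [List.replicate_succ]
      cases k with
      | zero => omega
      | succ j =>
        rw [List.replicate_succ] at this ⊢
        simp_all [List.min?_cons]

-- each normalized column has exactly max_idx entries
theorem pv_len_norm (col : List String) (m : Nat) :
    (if 1 < col.length then
        ((col.map some).take m ++ List.replicate m (none : Option String)).take m
      else List.replicate m (some (col.getD 0 ""))).length = m := by
  by_cases h : 1 < col.length <;> simp [h]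

-- pointwise: B's padded column read at i equals A's per-record selection
theorem pv_point (col : List String) (m i : Nat) (hi : i < m) :
    (if 1 < col.length then
        ((col.map some).take m ++ List.replicate m (none : Option String)).take m
      else List.replicate m (some (col.getD 0 ""))).getD i none
    = (if 1 < col.length ∧ col.length ≤ i then (none : Option String)
        else some (if 1 < col.length then col.getD i "" else col.getD 0 "")) := by
  by_cases h : 1 < col.length
  · simp only [h, if_pos, true_and]
    rw [List.getD_eq_getElem?_getD, List.getElem?_take, if_pos hi]
    by_cases hc : col.length ≤ i
    · rw [if_pos hc]
      rw [List.getElem?_append_right (by simp; omega)]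
      rw [List.getElem?_replicate]
      simp only [List.length_take, List.length_map]
      rw [if_pos (by omega)]
      rfl
    · rw [if_neg hc]
      rw [List.getElem?_append_left (by simp; omega)]
      rw [List.getElem?_take, if_pos hi]
      have hc' : i < col.length := by omega
      rw [List.getElem?_map, List.getElem?_eq_getElem hc']
      simp [List.getD_eq_getElem?_getD, List.getElem?_eq_getElem hc']
  · simp [h, hi]

theorem breakdown_line_eq_alt (l : List String) (hpre : 12 ≤ l.length) :
    breakdown_line l = breakdown_line_alt l := by
  have hlen : 11 < (l.map pvSplitSemi).length := by simpa using (by omega : 11 < l.length)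
  have hget : PySem.List.pyGet? (l.map pvSplitSemi) 11 = (l.map pvSplitSemi)[11]? := by
    have := PySem.List.pyGet?_natCast (l.map pvSplitSemi) 11
    simpa using this
  simp only [breakdown_line, breakdown_line_alt, hget, List.getElem?_eq_getElem hlen]
  set cols := l.map pvSplitSemi with hcols
  set m := cols[11].length with hm
  -- the normalized columns
  set g : List String → List (Option String) := fun col =>
    if 1 < col.length then
        ((col.map some).take m ++ List.replicate m (none : Option String)).take m
      else List.replicate m (some (col.getD 0 "")) with hg
  have hnormlen : (cols.map g).map List.length = List.replicate cols.length m := by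
    rw [List.map_map, List.eq_replicate_iff]
    constructor
    · simp
    · intro x hx
      simp only [List.mem_map] at hx
      obtain ⟨c, _, hc⟩ := hx
      rw [← hc]; simp only [Function.comp, hg]; exact pv_len_norm c m
  have hk : (((cols.map g).map List.length).min?).getD 0 = m := by
    rw [hnormlen, pv_min?_replicate m cols.length (by simp [hcols]; omega)]
    rfl
  rw [pv_foldl_app, List.nil_append, hk]
  apply List.map_congr_left
  intro i hi
  rw [List.mem_range] at hi
  simp only [List.map_map]
  apply List.map_congr_left
  intro x _
  simp only [Function.comp, hg]
  exact (pv_point (pvSplitSemi x) m i hi).symm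

-- ===== VERDICT (by name: the statement is the Claim_ definition above) =====
theorem breakdown_line_spec : Claim_equal_breakdown_line := by
  intro l _ hpre
  unfold Spec_breakdown_line
  exact breakdown_line_eq_alt l hpre
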